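-- pv_equiv track=rewrite | github.com/melekhov-sa/OtdelZakup | app/parsing/tail_extractor.py | strip_tail_phrase
-- ===== SOURCE A (Python) =====
-- from typing import Optional
--
-- def strip_tail_phrase(
--     text: str,
--     phrases: list[str],
-- ) -> tuple[str, Optional[str]]:
--     """Strip the longest matching active tail phrase from the end of *text*.
--
--     Comparison is case-insensitive and ignores leading/trailing whitespace.
--
--     Returns:
--         (clean_text, matched_phrase_or_None)
--     """
--     t = text.strip()
--     t_lower = t.lower()
--     for phrase in sorted(phrases, key=len, reverse=True):
--         p = phrase.strip()
--         if not p: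
--             continue
--         if t_lower.endswith(p.lower()):
--             return t[: -len(p)].rstrip(), phrase
--     return t, None
-- ===== SOURCE B (Python) =====
-- from typing import Optional
--
-- def strip_tail_phrase(
--     text: str,
--     phrases: list[str],
-- ) -> tuple[str, Optional[str]]:
--     """Single pass: track the matching phrase of maximal (unstripped) length,
--     first occurrence winning ties, instead of sorting and early-exiting."""
--     t = text.strip()
--     t_lower = t.lower()
--     best = None
--     best_p = ""
--     best_len = -1
--     for phrase in phrases:
--         p = phrase.strip()
--         if p and t_lower.endswith(p.lower()) and len(phrase) > best_len:
--             best, best_p, best_len = phrase, p, len(phrase)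
--     if best is None:
--         return t, None
--     return t[: -len(best_p)].rstrip(), best
-- ===== Notes on version B (the rewrite author's own statement) =====
-- stated objective: alternative
-- what changed: Replaced sort-by-length-descending plus early-exit scan with a single max-tracking pass over the phrases in original order (strict > on unstripped length reproduces the stable-sort tie-break), removing the sort.
import Mathlib
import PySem

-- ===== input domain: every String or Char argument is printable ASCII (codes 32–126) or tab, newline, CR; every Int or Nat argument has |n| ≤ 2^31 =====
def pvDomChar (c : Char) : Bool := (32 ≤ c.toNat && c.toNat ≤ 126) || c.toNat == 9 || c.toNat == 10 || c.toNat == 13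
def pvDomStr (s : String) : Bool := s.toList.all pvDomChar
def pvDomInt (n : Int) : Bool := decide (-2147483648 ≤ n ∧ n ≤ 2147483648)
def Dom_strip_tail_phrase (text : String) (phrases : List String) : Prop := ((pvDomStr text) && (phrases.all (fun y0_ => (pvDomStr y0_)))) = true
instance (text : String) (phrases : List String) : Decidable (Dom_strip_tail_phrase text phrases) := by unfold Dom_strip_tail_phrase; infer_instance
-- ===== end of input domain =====

-- B replaces A's sort-by-length-descending + first-match scan by one max-tracking
-- pass over the phrases in original order (objective: alternative, no sort).

-- ===== PORT A =====
-- A's loop: scan the length-sorted list, returning at the first match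
def stpGoA (t tl : String) : List String → String × Option String
  | [] => (t, none)
  | phrase :: rest =>
    let p := PySem.Str.strip phrase
    if p = "" then stpGoA t tl rest
    else if PySem.Str.endswith tl (PySem.Str.lower p) then
      (PySem.Str.rstrip (PySem.Str.slice t none (some (-(PySem.Str.len p)))), some phrase)
    else stpGoA t tl rest

def strip_tail_phrase (text : String) (phrases : List String) : String × Option String :=
  let t := PySem.Str.strip text
  let t_lower := PySem.Str.lower t
  stpGoA t t_lower (PySem.List.sorted phrases (fun s => PySem.Str.len s) true)

-- ===== PORT B =====
-- B's loop body: fold tracking (best, best_p, best_len), strict > on len(phrase)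
def stpStepB (tl : String) (acc : Option String × String × Int) (phrase : String) :
    Option String × String × Int :=
  let p := PySem.Str.strip phrase
  if (!(p = "")) && PySem.Str.endswith tl (PySem.Str.lower p)
      && (PySem.Str.len phrase > acc.2.2) then
    (some phrase, p, PySem.Str.len phrase)
  else acc

def strip_tail_phrase_alt (text : String) (phrases : List String) : String × Option String :=
  let t := PySem.Str.strip text
  let t_lower := PySem.Str.lower t
  let st := phrases.foldl (stpStepB t_lower) (none, "", -1)
  match st.1 with
  | none => (t, none)
  | some best =>
    (PySem.Str.rstrip (PySem.Str.slice t none (some (-(PySem.Str.len st.2.1)))), some best)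

-- ===== PRECONDITION & SPEC =====
def Spec_strip_tail_phrase (text : String) (phrases : List String) (out : String × Option String) : Prop := out = strip_tail_phrase_alt text phrases
instance (text : String) (phrases : List String) (out : String × Option String) : Decidable (Spec_strip_tail_phrase text phrases out) := by unfold Spec_strip_tail_phrase; infer_instance

-- ===== CLAIM (what is proved, stated in full; the proofs are below) =====
def Claim_equal_strip_tail_phrase : Prop := ∀ (text : String) (phrases : List String), Dom_strip_tail_phrase text phrases → Spec_strip_tail_phrase text phrases (strip_tail_phrase text phrases)

-- ===== LEMMAS AND PROOFS =====

-- the common predicate: phrase (stripped) is nonempty and matches the tail of tl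
def stpPred (tl phrase : String) : Bool :=
  (!(PySem.Str.strip phrase = "")) && PySem.Str.endswith tl (PySem.Str.lower (PySem.Str.strip phrase))

-- A's result as a function of the found phrase
def stpRes (t : String) (m? : Option String) : String × Option String :=
  match m? with
  | none => (t, none)
  | some m =>
    (PySem.Str.rstrip (PySem.Str.slice t none (some (-(PySem.Str.len (PySem.Str.strip m))))), some m)

-- B's fold state as a function of the found phrase
def stpSt (m? : Option String) : Option String × String × Int :=
  match m? with
  | none => (none, "", -1)
  | some m => (some m, PySem.Str.strip m, PySem.Str.len m)

lemma stpPred_true_iff (tl y : String) :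
    stpPred tl y = true ↔
      (¬ PySem.Str.strip y = "" ∧
        PySem.Str.endswith tl (PySem.Str.lower (PySem.Str.strip y)) = true) := by
  unfold stpPred
  simp only [Bool.and_eq_true, Bool.not_eq_true', decide_eq_false_iff_not]

lemma stpLen_nonneg (s : String) : (0 : Int) ≤ PySem.Str.len s := by
  simp [PySem.Str.len_eq]

lemma stpGoA_eq_find (t tl : String) (ys : List String) :
    stpGoA t tl ys = stpRes t (ys.find? (stpPred tl)) := by
  induction ys with
  | nil => rfl
  | cons y ys ih =>
    by_cases h1 : PySem.Str.strip y = ""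
    · have hpf : ¬ (stpPred tl y = true) := fun h => ((stpPred_true_iff tl y).mp h).1 h1
      have hstep : stpGoA t tl (y :: ys) = stpGoA t tl ys := by
        simp only [stpGoA]; rw [if_pos h1]
      rw [hstep, ih, List.find?_cons_of_neg hpf]
    · by_cases h2 : PySem.Str.endswith tl (PySem.Str.lower (PySem.Str.strip y)) = true
      · have hpt : stpPred tl y = true := (stpPred_true_iff tl y).mpr ⟨h1, h2⟩
        have hstep : stpGoA t tl (y :: ys) =
            (PySem.Str.rstrip (PySem.Str.slice t none (some (-(PySem.Str.len (PySem.Str.strip y))))), some y) := by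
          simp only [stpGoA]; rw [if_neg h1, if_pos h2]
        rw [hstep, List.find?_cons_of_pos hpt]
        rfl
      · have hpf : ¬ (stpPred tl y = true) := fun h => h2 ((stpPred_true_iff tl y).mp h).2
        have hstep : stpGoA t tl (y :: ys) = stpGoA t tl ys := by
          simp only [stpGoA]; rw [if_neg h1, if_neg h2]
        rw [hstep, ih, List.find?_cons_of_neg hpf]

lemma stpStepB_pos (tl : String) (acc : Option String × String × Int) (phrase : String)
    (h1 : ¬ PySem.Str.strip phrase = "")
    (h2 : PySem.Str.endswith tl (PySem.Str.lower (PySem.Str.strip phrase)) = true)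
    (h3 : acc.2.2 < PySem.Str.len phrase) :
    stpStepB tl acc phrase = (some phrase, PySem.Str.strip phrase, PySem.Str.len phrase) := by
  simp only [stpStepB]
  split_ifs with h
  · rfl
  · exfalso
    apply h
    simp only [Bool.and_eq_true, Bool.not_eq_true', decide_eq_false_iff_not, decide_eq_true_eq]
    exact ⟨⟨h1, h2⟩, h3⟩

lemma stpStepB_neg (tl : String) (acc : Option String × String × Int) (phrase : String)
    (h : ¬ (¬ PySem.Str.strip phrase = "" ∧
        PySem.Str.endswith tl (PySem.Str.lower (PySem.Str.strip phrase)) = true ∧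
        acc.2.2 < PySem.Str.len phrase)) :
    stpStepB tl acc phrase = acc := by
  simp only [stpStepB]
  split_ifs with hc
  · exfalso
    apply h
    simp only [Bool.and_eq_true, Bool.not_eq_true', decide_eq_false_iff_not,
      decide_eq_true_eq] at hc
    exact ⟨hc.1.1, hc.1.2, hc.2⟩
  · rfl

-- where insertBy (stable, descending by key) puts x, as seen by find?
lemma stpFind_insertBy {α : Type} (p : α → Bool) (key : α → Int) (x : α) (ys : List α)
    (hys : ys.Pairwise (fun a b => key b ≤ key a)) :
    (PySem.List.insertBy (fun a b => decide (key b < key a)) x ys).find? p =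
      match ys.find? p with
      | none => if p x then some x else none
      | some m => if p x ∧ key m < key x then some x else some m := by
  induction ys with
  | nil =>
    simp [PySem.List.insertBy, List.find?]
  | cons y ys ih =>
    have hys' : ys.Pairwise (fun a b => key b ≤ key a) := (List.pairwise_cons.mp hys).2
    have hyge : ∀ z ∈ ys, key z ≤ key y := (List.pairwise_cons.mp hys).1
    by_cases hlt : key y < key x
    · -- x is inserted in front of y
      have hins : PySem.List.insertBy (fun a b => decide (key b < key a)) x (y :: ys)
          = x :: y :: ys := by simp [PySem.List.insertBy, hlt]
      by_cases hpx : p x = true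
      · rw [hins, List.find?_cons_of_pos hpx]
        cases hfy : (y :: ys).find? p with
        | none => simp [hpx]
        | some m =>
          have hm : m ∈ y :: ys := List.mem_of_find?_eq_some hfy
          have hmle : key m ≤ key y := by
            rcases List.mem_cons.mp hm with h | h
            · simp [h]
            · exact hyge m h
          have hmx : key m < key x := lt_of_le_of_lt hmle hlt
          simp [hpx, hmx]
      · rw [hins, List.find?_cons_of_neg hpx]
        cases hfy : (y :: ys).find? p with
        | none => simp [hpx]
        | some m => simp [hpx]
    · -- x goes after y
      have hstep : PySem.List.insertBy (fun a b => decide (key b < key a)) x (y :: ys)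
          = y :: PySem.List.insertBy (fun a b => decide (key b < key a)) x ys := by
        simp [PySem.List.insertBy, hlt]
      rw [hstep]
      by_cases hpy : p y = true
      · have hnot : ¬ (p x = true ∧ key y < key x) := by
          intro ⟨_, h⟩; exact hlt h
        simp [hpy, hnot]
      · have hpy' : p y = false := by simpa using hpy
        simp [hpy', ih hys']

-- B's fold state equals find? over A's sorted list
lemma stpFold_eq (tl : String) (l : List String) :
    l.foldl (stpStepB tl) (none, "", -1) =
      stpSt ((PySem.List.sorted l (fun s => PySem.Str.len s) true).find? (stpPred tl)) := by
  induction l using List.reverseRecOn with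
  | nil => rfl
  | append_singleton l x ih =>
    rw [List.foldl_append, List.foldl_cons, List.foldl_nil, ih]
    have hsorted : PySem.List.sorted (l ++ [x]) (fun s => PySem.Str.len s) true
        = PySem.List.insertBy (fun a b => decide (PySem.Str.len b < PySem.Str.len a)) x
            (PySem.List.sorted l (fun s => PySem.Str.len s) true) := by
      rw [PySem.List.sorted_rev_eq_foldl_insertBy, PySem.List.sorted_rev_eq_foldl_insertBy,
        List.foldl_append, List.foldl_cons, List.foldl_nil]
    rw [hsorted,
      stpFind_insertBy (stpPred tl) (fun s => PySem.Str.len s) x _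
        (PySem.List.sorted_pairwise_rev l (fun s => PySem.Str.len s))]
    cases hf : (PySem.List.sorted l (fun s => PySem.Str.len s) true).find? (stpPred tl) with
    | none =>
      show stpStepB tl (stpSt none) x = stpSt (if stpPred tl x = true then some x else none)
      by_cases hpx : stpPred tl x = true
      · obtain ⟨h1, h2⟩ := (stpPred_true_iff tl x).mp hpx
        have h3 : (stpSt none).2.2 < PySem.Str.len x := by
          show (-1 : Int) < _
          have h0 := stpLen_nonneg x
          omega
        rw [stpStepB_pos tl _ x h1 h2 h3, if_pos hpx]
        rfl
      · have hn : ¬ (¬ PySem.Str.strip x = "" ∧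
            PySem.Str.endswith tl (PySem.Str.lower (PySem.Str.strip x)) = true ∧
            (stpSt none).2.2 < PySem.Str.len x) := by
          intro ⟨a, b, _⟩
          exact hpx ((stpPred_true_iff tl x).mpr ⟨a, b⟩)
        rw [stpStepB_neg tl _ x hn, if_neg hpx]
    | some m =>
      show stpStepB tl (stpSt (some m)) x =
        stpSt (if stpPred tl x = true ∧ PySem.Str.len m < PySem.Str.len x then some x else some m)
      by_cases hc : stpPred tl x = true ∧ PySem.Str.len m < PySem.Str.len x
      · obtain ⟨h1, h2⟩ := (stpPred_true_iff tl x).mp hc.1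
        have h3 : (stpSt (some m)).2.2 < PySem.Str.len x := hc.2
        rw [stpStepB_pos tl _ x h1 h2 h3, if_pos hc]
        rfl
      · have hn : ¬ (¬ PySem.Str.strip x = "" ∧
            PySem.Str.endswith tl (PySem.Str.lower (PySem.Str.strip x)) = true ∧
            (stpSt (some m)).2.2 < PySem.Str.len x) := by
          intro ⟨a, b, c⟩
          exact hc ⟨(stpPred_true_iff tl x).mpr ⟨a, b⟩, c⟩
        rw [stpStepB_neg tl _ x hn, if_neg hc]

-- ===== VERDICT (by name: the statement is the Claim_ definition above) =====
theorem strip_tail_phrase_spec : Claim_equal_strip_tail_phrase := by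
  intro text phrases _
  unfold Spec_strip_tail_phrase strip_tail_phrase strip_tail_phrase_alt
  simp only [stpGoA_eq_find, stpFold_eq]
  cases hf : (PySem.List.sorted phrases (fun s => PySem.Str.len s) true).find?
      (stpPred (PySem.Str.lower (PySem.Str.strip text))) with
  | none => rfl
  | some m => rfl
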